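-- pv_equiv track=rewrite | github.com/alekslovestech/truchet | formatter.py | combine_letters
-- ===== SOURCE A (Python) =====
-- from typing import TypeAlias
--
-- Letter: TypeAlias = list[str]  # Always 5 elements
--
-- def combine_letters(letters: list[Letter], spacing: int = 1, rows: int = 5) -> list[str]:
--     """
--     Combine multiple letters horizontally.
--     Assumes all letters have exactly `rows` lines.
--
--     Args:
--         letters: List of letter representations (each is a list of lines)
--         spacing: Number of spaces between letters
--         rows: Number of rows per letter (default UNFRAMED_ROWS; use FRAMED_ROWS for framed)
--
--     Returns:
--         Combined lines
--     """
--     if not letters: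
--         return []
--
--     max_widths = [3] * rows
--     for letter in letters:
--         if letter:
--             for row in range(min(rows, len(letter))):
--                 max_widths[row] = max(max_widths[row], len(letter[row]), 3)
--
--     padded_letters = []
--     for letter in letters:
--         if letter:
--             padded = []
--             for row in range(rows):
--                 if row < len(letter):
--                     padded.append(letter[row].ljust(max_widths[row]))
--                 else:
--                     padded.append(" " * max_widths[row])
--             padded_letters.append(padded)
--         else:
--             padded_letters.append([""] * rows)
--
--     result = []
--     for row in range(rows):
--         line_parts = [padded_letter[row] for padded_letter in padded_letters]
--         result.append((" " * spacing).join(line_parts))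
--
--     return result
-- ===== SOURCE B (Python) =====
-- def combine_letters(letters, spacing=1, rows=5):
--     """Letter-major accumulation: grow the output lines by string concatenation,
--     one letter at a time; no padded matrix and no row-wise join."""
--     if not letters:
--         return []
--     widths = [max([3] + [len(l[r]) for l in letters if r < len(l)])
--               for r in range(rows)]
--     out = None
--     for letter in letters:
--         if letter:
--             block = [letter[r].ljust(widths[r]) if r < len(letter) else " " * widths[r]
--                      for r in range(rows)]
--         else:
--             block = [""] * rows
--         out = block if out is None else [out[r] + " " * spacing + block[r] for r in range(rows)]
--     return out
-- ===== Notes on version B (the rewrite author's own statement) =====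
-- stated objective: alternative
-- what changed: B never builds A's padded matrix or does a row-wise join: it computes each row width by a max over a comprehension and then grows the output lines letter by letter (letter-major left fold), concatenating each letter's block onto the accumulated lines; the repeated string concatenation makes B quadratic in the number of letters, so the trade is structure, not speed.
import Mathlib
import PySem

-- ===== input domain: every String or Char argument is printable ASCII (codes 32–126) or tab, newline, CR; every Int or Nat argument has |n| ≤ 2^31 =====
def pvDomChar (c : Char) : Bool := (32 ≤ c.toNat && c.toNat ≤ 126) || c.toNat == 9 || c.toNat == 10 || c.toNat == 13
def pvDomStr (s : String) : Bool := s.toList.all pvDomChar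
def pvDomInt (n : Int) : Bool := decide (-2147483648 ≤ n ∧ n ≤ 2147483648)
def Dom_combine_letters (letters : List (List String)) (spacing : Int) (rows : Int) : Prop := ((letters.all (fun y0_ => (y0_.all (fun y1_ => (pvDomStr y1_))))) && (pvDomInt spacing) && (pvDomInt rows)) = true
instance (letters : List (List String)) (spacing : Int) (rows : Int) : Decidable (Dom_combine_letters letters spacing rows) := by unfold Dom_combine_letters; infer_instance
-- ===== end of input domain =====

-- B grows the output lines letter by letter (letter-major left fold, string concatenation)
-- instead of A's padded matrix and row-wise join: objective 'alternative'.

-- s.ljust(w): right-pad with spaces to width w (the .ljust both Pythons call)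
def pyLjust (s : String) (w : Int) : String :=
  String.ofList (s.toList ++ List.replicate (w - PySem.Str.len s).toNat ' ')

-- " " * w
def pySpaces (w : Int) : String := String.ofList (List.replicate w.toNat ' ')

-- ===== PORT A =====
-- the max_widths loop: for letter in letters: if letter: for row in range(min(rows,len(letter))): max_widths[row] = max(...)
def aWidths (letters : List (List String)) (rows : Int) : List Int :=
  letters.foldl (fun mw letter =>
    if letter ≠ [] then
      (PySem.List.pyRange 0 (min rows (letter.length : Int))).foldl
        (fun mw row => PySem.List.pySetD mw row
          (max (max (PySem.List.pyGetD mw row 0)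
                    (PySem.Str.len (PySem.List.pyGetD letter row ""))) 3)) mw
    else mw) (PySem.List.pyRepeat [3] rows)

-- one letter's entry in padded_letters
def aPadded (mw : List Int) (rows : Int) (letter : List String) : List String :=
  if letter ≠ [] then
    (PySem.List.pyRange 0 rows).map (fun row =>
      if row < (letter.length : Int) then
        pyLjust (PySem.List.pyGetD letter row "") (PySem.List.pyGetD mw row 0)
      else pySpaces (PySem.List.pyGetD mw row 0))
  else PySem.List.pyRepeat [""] rows

def combine_letters (letters : List (List String)) (spacing : Int) (rows : Int) : List String :=
  if letters = [] then []
  else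
    let mw := aWidths letters rows
    let padded_letters := letters.foldl (fun acc letter => acc ++ [aPadded mw rows letter]) []
    (PySem.List.pyRange 0 rows).map (fun row =>
      PySem.Str.join (pySpaces spacing) (padded_letters.map (fun pl => PySem.List.pyGetD pl row "")))

-- ===== PORT B =====
-- widths = [max([3] + [len(l[r]) for l in letters if r < len(l)]) for r in range(rows)]
-- (all of Source B's list indexings are in range, so the total pyGetD form is exact)
def bWidths (letters : List (List String)) (rows : Int) : List Int :=
  (PySem.List.pyRange 0 rows).map (fun r =>
    ((letters.filter (fun l => decide (r < (l.length : Int)))).map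
        (fun l => PySem.Str.len (PySem.List.pyGetD l r ""))).foldl max 3)

def combine_letters_alt (letters : List (List String)) (spacing : Int) (rows : Int) : List String :=
  if letters = [] then []
  else
    let widths := bWidths letters rows
    (letters.foldl (fun (out : Option (List String)) letter =>
      let block :=
        if letter ≠ [] then
          (PySem.List.pyRange 0 rows).map (fun r =>
            if r < (letter.length : Int) then
              pyLjust (PySem.List.pyGetD letter r "") (PySem.List.pyGetD widths r 0)
            else pySpaces (PySem.List.pyGetD widths r 0))
        else PySem.List.pyRepeat [""] rows
      some (match out with
        | none => block
        | some o => (PySem.List.pyRange 0 rows).map (fun r =>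
            PySem.List.pyGetD o r "" ++ pySpaces spacing ++ PySem.List.pyGetD block r ""))) none).getD []

-- ===== PRECONDITION & SPEC =====
def Spec_combine_letters (letters : List (List String)) (spacing : Int) (rows : Int) (out : List String) : Prop := out = combine_letters_alt letters spacing rows
instance (letters : List (List String)) (spacing : Int) (rows : Int) (out : List String) : Decidable (Spec_combine_letters letters spacing rows out) := by unfold Spec_combine_letters; infer_instance

-- ===== CLAIM (what is proved, stated in full; the proofs are below) =====
def Claim_equal_combine_letters : Prop := ∀ (letters : List (List String)) (spacing : Int) (rows : Int), Dom_combine_letters letters spacing rows → Spec_combine_letters letters spacing rows (combine_letters letters spacing rows)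

-- ===== LEMMAS AND PROOFS =====

-- B's running maximum for one row, in the 'for letter in letters' order (the common yardstick both ports are reduced to)
def bWidth (letters : List (List String)) (row : Int) : Int :=
  letters.foldl (fun w l =>
    if l ≠ [] ∧ row < (l.length : Int) then
      max w (PySem.Str.len (PySem.List.pyGetD l row "")) else w) 3

-- the per-letter part of one output row, at a given width
def partAt (w : Int) (r : Int) (l : List String) : String :=
  if l = [] then ""
  else if r < (l.length : Int) then pyLjust (PySem.List.pyGetD l r "") w
  else pySpaces w

-- Nat-indexed view of A's inner max_widths loop: each iteration sets index k from its own old value.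
def setFold (f : Nat → Int → Int) (n : Nat) (mw : List Int) : List Int :=
  (List.range n).foldl (fun mw k => mw.set k (f k (mw.getD k 0))) mw

lemma setFold_length (f : Nat → Int → Int) (n : Nat) (mw : List Int) :
    (setFold f n mw).length = mw.length := by
  induction n with
  | zero => simp [setFold]
  | succ n ih =>
    simp only [setFold, List.range_succ, List.foldl_append, List.foldl_cons, List.foldl_nil]
    simpa [List.length_set] using ih

lemma setFold_getD (f : Nat → Int → Int) (n : Nat) (mw : List Int) (r : Nat)
    (hr : r < mw.length) :
    (setFold f n mw).getD r 0 = if r < n then f r (mw.getD r 0) else mw.getD r 0 := by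
  induction n with
  | zero => simp [setFold]
  | succ n ih =>
    have hlen : (setFold f n mw).length = mw.length := setFold_length f n mw
    have hstep : setFold f (n+1) mw
        = (setFold f n mw).set n (f n ((setFold f n mw).getD n 0)) := by
      simp [setFold, List.range_succ, List.foldl_append]
    by_cases hrn : r = n
    · subst hrn
      have h1 : (setFold f r mw).getD r 0 = mw.getD r 0 := by rw [ih]; simp
      rw [hstep, h1]
      simp [List.getD, hlen, hr]
    · rw [hstep]
      have h2 : ((setFold f n mw).set n (f n ((setFold f n mw).getD n 0))).getD r 0
          = (setFold f n mw).getD r 0 := by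
        simp [List.getD, Ne.symm hrn]
      rw [h2, ih]
      by_cases h3 : r < n
      · simp [h3, Nat.lt_succ_of_lt h3]
      · have h4 : ¬ r < n + 1 := by omega
        simp [h3, h4]

-- A's Int-range inner loop over one letter IS a setFold.
lemma inner_eq_setFold (f : Int → Int → Int) (m : Int) (mw : List Int) :
    (PySem.List.pyRange 0 m).foldl
      (fun mw row => PySem.List.pySetD mw row (f row (PySem.List.pyGetD mw row 0))) mw
    = setFold (fun k v => f (k : Int) v) (m - 0).toNat mw := by
  rw [PySem.List.pyRange_one, List.foldl_map, setFold]
  simp only [zero_add, PySem.List.pySetD_natCast, PySem.List.pyGetD_natCast]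

-- invariant transport: A's table entry at row r (< rows) equals B's running maximum.
lemma widths_agree (rows : Int) (r : Nat) (hrows : (r : Int) < rows) :
    ∀ (letters : List (List String)) (mw : List Int), r < mw.length → 3 ≤ mw.getD r 0 →
    (letters.foldl (fun mw letter =>
        if letter ≠ [] then
          (PySem.List.pyRange 0 (min rows (letter.length : Int))).foldl
            (fun mw row => PySem.List.pySetD mw row
              (max (max (PySem.List.pyGetD mw row 0)
                        (PySem.Str.len (PySem.List.pyGetD letter row ""))) 3)) mw
        else mw) mw).getD r 0
    = letters.foldl (fun w l =>
        if l ≠ [] ∧ (r : Int) < (l.length : Int) then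
          max w (PySem.Str.len (PySem.List.pyGetD l (r : Int) "")) else w) (mw.getD r 0) := by
  intro letters
  induction letters with
  | nil => intro mw _ _; simp
  | cons l ls ih =>
    intro mw hr h3
    by_cases hl : l = []
    · subst hl; simpa using ih mw hr h3
    · simp only [List.foldl_cons, ne_eq, hl, not_false_eq_true, if_true, true_and]
      rw [inner_eq_setFold
        (fun row v => max (max v (PySem.Str.len (PySem.List.pyGetD l row ""))) 3)]
      set n := (min rows (l.length : Int) - 0).toNat with hn
      set f : Nat → Int → Int :=
        fun k v => max (max v (PySem.Str.len (PySem.List.pyGetD l (k : Int) ""))) 3 with hf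
      have hlen := setFold_length f n mw
      have hget := setFold_getD f n mw r hr
      have hcond : (r < n) ↔ ((r : Int) < (l.length : Int)) := by omega
      by_cases hrl : (r : Int) < (l.length : Int)
      · have hv : (setFold f n mw).getD r 0
            = max (mw.getD r 0) (PySem.Str.len (PySem.List.pyGetD l (r : Int) "")) := by
          rw [hget, if_pos (hcond.mpr hrl)]
          simp only [hf]
          have : 3 ≤ max (mw.getD r 0) (PySem.Str.len (PySem.List.pyGetD l (r : Int) "")) :=
            le_trans h3 (le_max_left _ _)
          omega
        rw [ih _ (by omega) (by rw [hv]; exact le_trans h3 (le_max_left _ _)), hv, if_pos hrl]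
      · have hv : (setFold f n mw).getD r 0 = mw.getD r 0 := by
          rw [hget, if_neg (by rw [hcond]; exact hrl)]
        rw [ih _ (by omega) (by rw [hv]; exact h3), hv, if_neg hrl]

lemma aWidths_getD (letters : List (List String)) (rows : Int) (r : Nat)
    (hrows : (r : Int) < rows) :
    (aWidths letters rows).getD r 0 = bWidth letters (r : Int) := by
  unfold aWidths bWidth
  rw [widths_agree rows r hrows letters (PySem.List.pyRepeat [3] rows)
    (by rw [PySem.List.pyRepeat_singleton]; simp; omega)
    (by rw [PySem.List.pyRepeat_singleton, List.getD_replicate 3 (by simp; omega)])]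
  rw [PySem.List.pyRepeat_singleton, List.getD_replicate 3 (by simp; omega)]

-- per letter, per admitted row: A's padded entry is the common part at B's running maximum.
lemma padded_part (letters : List (List String)) (rows : Int) (l : List String) (r : Nat)
    (hrows : (r : Int) < rows) :
    PySem.List.pyGetD (aPadded (aWidths letters rows) rows l) (r : Int) ""
    = partAt (bWidth letters (r : Int)) (r : Int) l := by
  unfold aPadded partAt
  by_cases hl : l = []
  · simp only [hl, ne_eq, not_true_eq_false, if_false, if_true]
    rw [PySem.List.pyRepeat_singleton, PySem.List.pyGetD_natCast,
      List.getD_replicate "" (by omega)]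
  · simp only [ne_eq, hl, not_false_eq_true, if_true, if_false]
    rw [PySem.List.pyGetD_map_pyRange_of_nonneg _ rows (r : Int) "" (by omega) hrows]
    simp only [PySem.List.pyGetD_natCast]
    rw [aWidths_getD letters rows r hrows]

-- B's comprehension max (fold over the filtered lengths) is the same running maximum.
lemma filter_fold_max (r : Int) (hr : 0 ≤ r) (letters : List (List String)) :
    ∀ init : Int,
    ((letters.filter (fun l => decide (r < (l.length : Int)))).map
        (fun l => PySem.Str.len (PySem.List.pyGetD l r ""))).foldl max init
    = letters.foldl (fun w l =>
        if l ≠ [] ∧ r < (l.length : Int) then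
          max w (PySem.Str.len (PySem.List.pyGetD l r "")) else w) init := by
  induction letters with
  | nil => intro init; simp
  | cons l ls ih =>
    intro init
    by_cases hc : r < (l.length : Int)
    · have hl : l ≠ [] := by
        intro h; subst h; simp at hc; omega
      simp only [List.filter_cons, decide_eq_true_eq, hc, if_true, List.map_cons,
        List.foldl_cons, ne_eq, hl, not_false_eq_true, true_and]
      exact ih _
    · simp only [List.filter_cons, decide_eq_true_eq, hc, if_false, List.foldl_cons,
        and_false]
      exact ih init

lemma bWidths_getD (letters : List (List String)) (rows r : Int)
    (h0 : 0 ≤ r) (hr : r < rows) :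
    PySem.List.pyGetD (bWidths letters rows) r 0 = bWidth letters r := by
  unfold bWidths bWidth
  rw [PySem.List.pyGetD_map_pyRange_of_nonneg _ rows r 0 h0 hr]
  exact filter_fold_max r h0 letters 3

-- a constant comprehension over range(rows) is [""]*rows
lemma pyRepeat_empty_eq_map (rows : Int) :
    PySem.List.pyRepeat ([""] : List String) rows
    = (PySem.List.pyRange 0 rows).map (fun _ => "") := by
  rw [PySem.List.pyRepeat_singleton, PySem.List.pyRange_one, List.map_map]
  simp [Function.comp_def, List.map_const']

-- B's block for one letter, written as the common per-row part
lemma block_eq (letters : List (List String)) (rows : Int) (letter : List String) :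
    (if letter ≠ [] then
        (PySem.List.pyRange 0 rows).map (fun r =>
          if r < (letter.length : Int) then
            pyLjust (PySem.List.pyGetD letter r "") (PySem.List.pyGetD (bWidths letters rows) r 0)
          else pySpaces (PySem.List.pyGetD (bWidths letters rows) r 0))
      else PySem.List.pyRepeat [""] rows)
    = (PySem.List.pyRange 0 rows).map (fun r => partAt (bWidth letters r) r letter) := by
  by_cases hl : letter = []
  · simp only [hl, ne_eq, not_true_eq_false, if_false]
    rw [pyRepeat_empty_eq_map]
    exact List.map_congr_left (fun r _ => by simp [partAt])
  · simp only [ne_eq, hl, not_false_eq_true, if_true]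
    apply List.map_congr_left
    intro r hrmem
    obtain ⟨h0, hlt⟩ := PySem.List.mem_pyRange_one.mp hrmem
    rw [bWidths_getD letters rows r h0 hlt]
    simp [partAt, hl]

-- string-level view of B's concatenation loop
lemma foldl_concat_toList (sep : String) (xs : List String) :
    ∀ s : String, (xs.foldl (fun t y => t ++ sep ++ y) s).toList
      = s.toList ++ xs.flatMap (fun y => sep.toList ++ y.toList) := by
  induction xs with
  | nil => intro s; simp
  | cons y ys ih => intro s; rw [List.foldl_cons, ih]; simp

lemma join_toList (sep : String) (x : String) (xs : List String) :
    (PySem.Str.join sep (x :: xs)).toList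
      = x.toList ++ xs.flatMap (fun y => sep.toList ++ y.toList) := by
  induction xs generalizing x with
  | nil => simp [PySem.Str.join, PySem.Chars.join, List.intercalate]
  | cons y ys ih =>
    have h := PySem.Chars.join_cons_cons sep.toList x.toList y.toList (ys.map String.toList)
    have h2 : (PySem.Str.join sep (x :: y :: ys)).toList
        = x.toList ++ sep.toList ++ (PySem.Str.join sep (y :: ys)).toList := by
      simp [PySem.Str.join, h]
    rw [h2, ih y]
    simp [List.flatMap_cons, List.append_assoc]

-- sep.join([p0] + parts) is B's left-to-right concatenation
lemma join_eq_foldl (sep : String) (x : String) (xs : List String) :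
    xs.foldl (fun t y => t ++ sep ++ y) x = PySem.Str.join sep (x :: xs) := by
  apply String.toList_inj.mp
  rw [foldl_concat_toList, join_toList]

-- B's Option fold, once the accumulator is a concrete row map
lemma fold_some (rows : Int) (sep : String) (F : Int → List String → String)
    (ls : List (List String)) :
    ∀ g : Int → String,
    ls.foldl (fun (out : Option (List String)) letter =>
        some (match out with
          | none => (PySem.List.pyRange 0 rows).map (fun r => F r letter)
          | some o => (PySem.List.pyRange 0 rows).map (fun r =>
              PySem.List.pyGetD o r "" ++ sep
                ++ PySem.List.pyGetD ((PySem.List.pyRange 0 rows).map (fun r => F r letter)) r "")))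
      (some ((PySem.List.pyRange 0 rows).map g))
    = some ((PySem.List.pyRange 0 rows).map (fun r =>
        ls.foldl (fun s l => s ++ sep ++ F r l) (g r))) := by
  induction ls with
  | nil => intro g; simp
  | cons y ys ih =>
    intro g
    rw [List.foldl_cons]
    have hstep : ((PySem.List.pyRange 0 rows).map (fun r =>
        PySem.List.pyGetD ((PySem.List.pyRange 0 rows).map g) r "" ++ sep
          ++ PySem.List.pyGetD ((PySem.List.pyRange 0 rows).map (fun r => F r y)) r ""))
        = (PySem.List.pyRange 0 rows).map (fun r => g r ++ sep ++ F r y) := by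
      apply List.map_congr_left
      intro r hrmem
      obtain ⟨h0, hlt⟩ := PySem.List.mem_pyRange_one.mp hrmem
      rw [PySem.List.pyGetD_map_pyRange_of_nonneg g rows r "" h0 hlt,
        PySem.List.pyGetD_map_pyRange_of_nonneg (fun r => F r y) rows r "" h0 hlt]
    simp only [hstep]
    rw [ih (fun r => g r ++ sep ++ F r y)]
    simp only [List.foldl_cons]

-- B on a non-empty list, computed out: per-row left-to-right concatenation of the parts
lemma alt_eq (spacing rows : Int) (l0 : List String) (rest : List (List String)) :
    combine_letters_alt (l0 :: rest) spacing rows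
    = (PySem.List.pyRange 0 rows).map (fun r =>
        rest.foldl (fun s l => s ++ pySpaces spacing ++ partAt (bWidth (l0 :: rest) r) r l)
          (partAt (bWidth (l0 :: rest) r) r l0)) := by
  have hne : (l0 :: rest : List (List String)) ≠ [] := by simp
  simp only [combine_letters_alt, if_neg hne]
  simp only [block_eq (l0 :: rest) rows]
  rw [List.foldl_cons]
  rw [fold_some rows (pySpaces spacing)
    (fun r l => partAt (bWidth (l0 :: rest) r) r l) rest
    (fun r => partAt (bWidth (l0 :: rest) r) r l0)]
  simp

-- ===== VERDICT (by name: the statement is the Claim_ definition above) =====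
theorem combine_letters_spec : Claim_equal_combine_letters := by
  intro letters spacing rows _
  unfold Spec_combine_letters
  by_cases hl : letters = []
  · simp [hl, combine_letters, combine_letters_alt]
  · obtain ⟨l0, rest, rfl⟩ := List.exists_cons_of_ne_nil hl
    rw [alt_eq]
    unfold combine_letters
    simp only [if_neg hl]
    rw [PySem.List.foldl_append_singleton_eq_map
      (aPadded (aWidths (l0 :: rest) rows) rows) (l0 :: rest) []]
    simp only [List.nil_append, List.map_map]
    apply List.map_congr_left
    intro row hrow
    obtain ⟨h0, hlt⟩ := PySem.List.mem_pyRange_one.mp hrow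
    obtain ⟨r, rfl⟩ : ∃ k : Nat, row = (k : Int) := ⟨row.toNat, (Int.toNat_of_nonneg h0).symm⟩
    have hparts : ((l0 :: rest).map
        (fun pl => PySem.List.pyGetD (aPadded (aWidths (l0 :: rest) rows) rows pl) (r : Int) ""))
        = (l0 :: rest).map (fun l => partAt (bWidth (l0 :: rest) (r : Int)) (r : Int) l) :=
      List.map_congr_left (fun l _ => padded_part (l0 :: rest) rows l r hlt)
    simp only [Function.comp_def] at hparts ⊢
    rw [hparts, List.map_cons]
    rw [← join_eq_foldl (pySpaces spacing)
      (partAt (bWidth (l0 :: rest) (r : Int)) (r : Int) l0)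
      (rest.map (partAt (bWidth (l0 :: rest) (r : Int)) (r : Int)))]
    rw [List.foldl_map]
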